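-- pv_equiv track=rewrite | github.com/chenzhao2023/ICA_Semantic_Baseline | ThinkMatch/data/artery_utils.py | find_neighbors_in_two_lists
-- ===== SOURCE A (Python) =====
-- def find_neighbors_in_two_lists(keys_with_single_value, list_to_find_neighbors_in):
--     '''Iterate over each item in first list to find a pair in the second list'''
--     neighbors = []
--     for i in keys_with_single_value:
--         for j in [x for x in list_to_find_neighbors_in if x != i]:
--             if i+1 == j:
--                 neighbors.append(i)
--                 neighbors.append(j)
--             if i-1 == j:
--                 neighbors.append(i)
--                 neighbors.append(j)
--     return neighbors
-- ===== SOURCE B (Python) =====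
-- def find_neighbors_in_two_lists(keys_with_single_value, list_to_find_neighbors_in):
--     '''Index each value's positions once, then merge the i-1/i+1 occurrence
--     positions for every key (O(n + m + output) instead of A's O(n*m)).'''
--     pos = {}
--     for idx, v in enumerate(list_to_find_neighbors_in):
--         pos.setdefault(v, []).append(idx)
--     out = []
--     for i in keys_with_single_value:
--         lo = pos.get(i - 1, [])
--         hi = pos.get(i + 1, [])
--         a = b = 0
--         while a < len(lo) or b < len(hi):
--             if b == len(hi) or (a < len(lo) and lo[a] < hi[b]):
--                 out.append(i)
--                 out.append(i - 1)
--                 a += 1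
--             else:
--                 out.append(i)
--                 out.append(i + 1)
--                 b += 1
--     return out
-- ===== Notes on version B (the rewrite author's own statement) =====
-- stated objective: faster
-- what changed: B builds a value-to-positions dict in one pass over the second list and, for each key, merges the sorted position lists of i-1 and i+1 instead of A's inner scan of the whole second list per key.
import Mathlib
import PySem

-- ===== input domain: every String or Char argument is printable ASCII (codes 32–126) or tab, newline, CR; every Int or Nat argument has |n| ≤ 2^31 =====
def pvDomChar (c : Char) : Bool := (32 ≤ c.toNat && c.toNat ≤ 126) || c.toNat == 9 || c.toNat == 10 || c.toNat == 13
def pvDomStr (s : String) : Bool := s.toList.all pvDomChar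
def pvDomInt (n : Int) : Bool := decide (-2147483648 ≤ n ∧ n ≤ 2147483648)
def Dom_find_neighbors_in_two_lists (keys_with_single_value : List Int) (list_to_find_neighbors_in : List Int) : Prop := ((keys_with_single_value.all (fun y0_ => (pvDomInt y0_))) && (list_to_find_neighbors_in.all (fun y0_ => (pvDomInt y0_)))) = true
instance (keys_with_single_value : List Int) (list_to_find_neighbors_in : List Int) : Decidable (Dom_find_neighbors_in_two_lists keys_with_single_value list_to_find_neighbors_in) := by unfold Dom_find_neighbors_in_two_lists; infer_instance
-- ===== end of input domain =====

-- B replaces A's per-key scan of the whole second list by a value→positions dict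
-- built once, merging the i-1/i+1 position lists per key (objective: faster).

-- ===== PORT A =====
def find_neighbors_in_two_lists (keys_with_single_value : List Int) (list_to_find_neighbors_in : List Int) : List Int :=
  keys_with_single_value.foldl (fun neighbors i =>
    (list_to_find_neighbors_in.filter (fun x => x != i)).foldl (fun acc j =>
      let acc := if i + 1 = j then acc ++ [i] ++ [j] else acc
      if i - 1 = j then acc ++ [i] ++ [j] else acc) neighbors) []

-- ===== PORT B =====
-- two-pointer merge of the sorted position lists of i-1 (lo) and i+1 (hi)
def pvMerge (i : Int) : List Int → List Int → List Int
  | [], [] => []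
  | [], _ :: hs => i :: (i + 1) :: pvMerge i [] hs
  | _ :: ls, [] => i :: (i - 1) :: pvMerge i ls []
  | a :: ls, b :: hs =>
      if a < b then i :: (i - 1) :: pvMerge i ls (b :: hs)
      else i :: (i + 1) :: pvMerge i (a :: ls) hs

def pvPositions (list_to_find_neighbors_in : List Int) : PySem.Dict Int (List Int) :=
  (PySem.List.enumerate list_to_find_neighbors_in 0).foldl
    (fun d p => d.modify p.2 [] (· ++ [p.1])) PySem.Dict.empty

def find_neighbors_in_two_lists_alt (keys_with_single_value : List Int) (list_to_find_neighbors_in : List Int) : List Int :=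
  let pos := pvPositions list_to_find_neighbors_in
  keys_with_single_value.foldl
    (fun out i => out ++ pvMerge i (pos.getD (i - 1) []) (pos.getD (i + 1) [])) []

-- ===== PRECONDITION & SPEC =====
def Spec_find_neighbors_in_two_lists (keys_with_single_value : List Int) (list_to_find_neighbors_in : List Int) (out : List Int) : Prop := out = find_neighbors_in_two_lists_alt keys_with_single_value list_to_find_neighbors_in
instance (keys_with_single_value : List Int) (list_to_find_neighbors_in : List Int) (out : List Int) : Decidable (Spec_find_neighbors_in_two_lists keys_with_single_value list_to_find_neighbors_in out) := by unfold Spec_find_neighbors_in_two_lists; infer_instance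

-- ===== CLAIM (what is proved, stated in full; the proofs are below) =====
def Claim_equal_find_neighbors_in_two_lists : Prop := ∀ (keys_with_single_value : List Int) (list_to_find_neighbors_in : List Int), Dom_find_neighbors_in_two_lists keys_with_single_value list_to_find_neighbors_in → Spec_find_neighbors_in_two_lists keys_with_single_value list_to_find_neighbors_in (find_neighbors_in_two_lists keys_with_single_value list_to_find_neighbors_in)

-- ===== LEMMAS AND PROOFS =====

-- per-element contribution of A's inner loop
def pvG (i j : Int) : List Int :=
  (if i + 1 = j then [i, j] else []) ++ (if i - 1 = j then [i, j] else [])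

lemma pvA_inner_body (i : Int) (acc : List Int) (j : Int) :
    (let acc' := if i + 1 = j then acc ++ [i] ++ [j] else acc
     if i - 1 = j then acc' ++ [i] ++ [j] else acc') = acc ++ pvG i j := by
  simp only [pvG]
  split_ifs with h1 h2 h2 <;> simp

lemma pvG_self (i : Int) : pvG i i = [] := by
  simp only [pvG]; split_ifs with h1 h2 h2 <;> first | rfl | omega

lemma pvFlatMap_filter_ne (i : Int) (l : List Int) :
    (l.filter (fun x => x != i)).flatMap (pvG i) = l.flatMap (pvG i) := by
  induction l with
  | nil => rfl
  | cons x xs ih =>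
      by_cases hx : x = i
      · subst hx; simp [pvG_self, ih]
      · simp [hx, ih]

lemma pvA_eq_flatMap (ks l : List Int) :
    find_neighbors_in_two_lists ks l = ks.flatMap (fun i => l.flatMap (pvG i)) := by
  unfold find_neighbors_in_two_lists
  have hinner : ∀ (acc : List Int) (i : Int), i ∈ ks →
      ((l.filter (fun x => x != i)).foldl (fun acc j =>
        let acc := if i + 1 = j then acc ++ [i] ++ [j] else acc
        if i - 1 = j then acc ++ [i] ++ [j] else acc) acc)
      = acc ++ l.flatMap (pvG i) := by
    intro acc i _
    have h1 : (l.filter (fun x => x != i)).foldl (fun acc j =>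
        let acc := if i + 1 = j then acc ++ [i] ++ [j] else acc
        if i - 1 = j then acc ++ [i] ++ [j] else acc) acc
      = (l.filter (fun x => x != i)).foldl (fun acc j => acc ++ pvG i j) acc :=
      PySem.List.foldl_congr_mem _ _ _ _ (fun a x _ => pvA_inner_body i a x)
    rw [h1, PySem.List.foldl_append_eq_flatMap, pvFlatMap_filter_ne]
  calc ks.foldl (fun neighbors i =>
        (l.filter (fun x => x != i)).foldl (fun acc j =>
          let acc := if i + 1 = j then acc ++ [i] ++ [j] else acc
          if i - 1 = j then acc ++ [i] ++ [j] else acc) neighbors) []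
      = ks.foldl (fun neighbors i => neighbors ++ l.flatMap (pvG i)) [] :=
        PySem.List.foldl_congr_mem _ _ _ _ (fun a i hi => hinner a i hi)
    _ = ks.flatMap (fun i => l.flatMap (pvG i)) := by
        rw [PySem.List.foldl_append_eq_flatMap]; rfl

-- position lists extracted from the dict built by B's first loop
lemma pvGetD_build (e : List (Int × Int)) (d : PySem.Dict Int (List Int)) (v : Int) :
    (e.foldl (fun d p => d.modify p.2 [] (· ++ [p.1])) d).getD v []
      = d.getD v [] ++ (e.filter (fun p => p.2 == v)).map (·.1) := by
  induction e generalizing d with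
  | nil => simp
  | cons p ps ih =>
      simp only [List.foldl_cons, ih, List.filter_cons]
      rw [PySem.Dict.getD_modify]
      by_cases h : p.2 = v
      · simp [h]
      · have : (p.2 == v) = false := by simp [h]
        simp [this, Ne.symm h]

lemma pvPositions_getD (l : List Int) (v : Int) :
    (pvPositions l).getD v []
      = ((PySem.List.enumerate l 0).filter (fun p => p.2 == v)).map (·.1) := by
  unfold pvPositions
  rw [pvGetD_build]; simp

-- every index in the enumerate-from-n filter is ≥ n
lemma pvMem_filter_ge (l : List Int) (n v : Int) (m : Int)
    (hm : m ∈ ((PySem.List.enumerate l n).filter (fun p => p.2 == v)).map (·.1)) :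
    n ≤ m := by
  simp only [List.mem_map, List.mem_filter] at hm
  obtain ⟨p, ⟨hp, _⟩, rfl⟩ := hm
  rw [PySem.List.mem_enumerate_iff] at hp
  obtain ⟨k, hk, rfl⟩ := hp
  simp

-- main merge lemma: merging the i-1/i+1 position lists reproduces the scan
lemma pvG_lo (i : Int) : pvG i (i - 1) = [i, i - 1] := by
  simp only [pvG]; split_ifs with h1 <;> first | rfl | omega

lemma pvG_hi (i : Int) : pvG i (i + 1) = [i, i + 1] := by
  simp only [pvG]; split_ifs with h1 <;> first | rfl | omega

lemma pvG_other (i x : Int) (h1 : x ≠ i - 1) (h2 : x ≠ i + 1) : pvG i x = [] := by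
  simp only [pvG]; split_ifs with a b <;> first | rfl | omega

lemma pvMerge_eq (i : Int) (l : List Int) (n : Int) :
    pvMerge i (((PySem.List.enumerate l n).filter (fun p => p.2 == i - 1)).map (·.1))
              (((PySem.List.enumerate l n).filter (fun p => p.2 == i + 1)).map (·.1))
      = l.flatMap (pvG i) := by
  induction l generalizing n with
  | nil => simp [PySem.List.enumerate_nil, pvMerge]
  | cons x xs ih =>
      rw [PySem.List.enumerate_cons, List.flatMap_cons]
      have hrec := ih (n + 1)
      by_cases hlo : x = i - 1
      · have hne : x ≠ i + 1 := by omega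
        subst hlo
        have e1 : ((i : Int) - 1 == i - 1) = true := by simp
        have e2 : ((i : Int) - 1 == i + 1) = false := by simp; omega
        simp only [List.filter_cons, e1, e2, Bool.false_eq_true, if_true, if_false,
          List.map_cons, pvG_lo, List.cons_append, List.nil_append]
        cases hHi : ((PySem.List.enumerate xs (n + 1)).filter (fun p => p.2 == i + 1)).map (·.1) with
        | nil =>
            rw [hHi] at hrec
            simp only [pvMerge, hrec]
        | cons b hs =>
            have hb : n < b := by
              have := pvMem_filter_ge xs (n + 1) (i + 1) b (by rw [hHi]; simp)
              omega
            rw [hHi] at hrec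
            simp only [pvMerge, if_pos hb, hrec]
      · by_cases hhi : x = i + 1
        · subst hhi
          have e1 : ((i : Int) + 1 == i - 1) = false := by simp; omega
          have e2 : ((i : Int) + 1 == i + 1) = true := by simp
          simp only [List.filter_cons, e1, e2, Bool.false_eq_true, if_true, if_false,
            List.map_cons, pvG_hi, List.cons_append, List.nil_append]
          cases hLo : ((PySem.List.enumerate xs (n + 1)).filter (fun p => p.2 == i - 1)).map (·.1) with
          | nil =>
              rw [hLo] at hrec
              simp only [pvMerge, hrec]
          | cons a ls =>
              have ha : ¬ a < n := by
                have := pvMem_filter_ge xs (n + 1) (i - 1) a (by rw [hLo]; simp)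
                omega
              rw [hLo] at hrec
              simp only [pvMerge, if_neg ha, hrec]
        · have e1 : (x == i - 1) = false := by simp [hlo]
          have e2 : (x == i + 1) = false := by simp [hhi]
          simp only [List.filter_cons, e1, e2, Bool.false_eq_true, if_false]
          rw [hrec, pvG_other i x hlo hhi, List.nil_append]

lemma pvB_eq_flatMap (ks l : List Int) :
    find_neighbors_in_two_lists_alt ks l = ks.flatMap (fun i => l.flatMap (pvG i)) := by
  unfold find_neighbors_in_two_lists_alt
  rw [PySem.List.foldl_append_eq_flatMap]
  simp only [List.nil_append]
  apply List.flatMap_congr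
  intro i _
  rw [pvPositions_getD, pvPositions_getD, pvMerge_eq]

-- ===== VERDICT (by name: the statement is the Claim_ definition above) =====
theorem find_neighbors_in_two_lists_spec : Claim_equal_find_neighbors_in_two_lists := by
  intro ks l _
  unfold Spec_find_neighbors_in_two_lists
  rw [pvA_eq_flatMap, pvB_eq_flatMap]
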